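-- pv_equiv track=rewrite | github.com/Nabbra/nabbra-python | app/nabbra.py | format_env_contents
-- ===== SOURCE A (Python) =====
-- from typing import Dict, Callable
--
-- def format_env_contents(current_contents: list[str], updates: Dict[str, str]) -> list[str]:
--     env_contents = current_contents.copy()
--
--     for var_name, var_value in updates.items():
--         var_found = False
--         for i, line in enumerate(env_contents):
--             if line.strip().startswith(f"{var_name}="):
--                 env_contents[i] = f'{var_name}="{var_value}"\n'
--                 var_found = True
--                 break
--
--         if not var_found:
--             env_contents.append(f'{var_name}="{var_value}"\n')
--
--     return env_contents
-- ===== SOURCE B (Python) =====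
-- def format_env_contents(current_contents, updates):
--     env_contents = list(current_contents)
--
--     # first line index registered under each variable name (text before the
--     # first '=' of the stripped line)
--     def register(first, line, i):
--         stripped = line.strip()
--         p = stripped.find("=")
--         if p != -1 and stripped[:p] not in first:
--             first[stripped[:p]] = i
--
--     first = {}
--     for i, line in enumerate(env_contents):
--         register(first, line, i)
--
--     for var_name, var_value in updates.items():
--         entry = f'{var_name}="{var_value}"\n'
--         i = first.get(var_name)
--         if i is None:
--             register(first, entry, len(env_contents))
--             env_contents.append(entry)
--         else:
--             env_contents[i] = entry
--     return env_contents
-- ===== Notes on version B (the rewrite author's own statement) =====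
-- stated objective: faster
-- what changed: Instead of rescanning all lines for every update (O(N*U)), B builds once a dict mapping each line's variable name (text before its first '=') to the first line index carrying it, then handles every update with one dict lookup, registering appended entries as it goes (O(N+U)).
-- outside the precondition, e.g. on format_env_contents(['A=B=1\n'], {'A=B': 'x'}): A returns ['A=B="x"\n'], B returns ['A=B=1\n', 'A=B="x"\n']
import Mathlib
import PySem

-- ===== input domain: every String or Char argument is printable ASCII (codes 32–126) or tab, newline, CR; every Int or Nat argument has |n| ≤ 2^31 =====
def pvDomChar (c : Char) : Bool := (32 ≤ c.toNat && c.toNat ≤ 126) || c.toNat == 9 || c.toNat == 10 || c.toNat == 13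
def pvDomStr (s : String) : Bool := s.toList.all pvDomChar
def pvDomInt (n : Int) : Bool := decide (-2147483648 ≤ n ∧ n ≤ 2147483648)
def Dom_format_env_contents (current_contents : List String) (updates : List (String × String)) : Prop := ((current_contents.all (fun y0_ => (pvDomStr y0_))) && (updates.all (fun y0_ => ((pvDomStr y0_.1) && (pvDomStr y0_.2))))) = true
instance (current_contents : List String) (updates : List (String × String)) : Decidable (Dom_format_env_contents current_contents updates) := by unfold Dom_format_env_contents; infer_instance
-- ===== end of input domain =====

-- B replaces A's per-update rescan of all lines by a variable-name → first-line-index dict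
-- built once (objective: faster; see a timing run for the measured speed-up).

-- the f-string f'{var_name}="{var_value}"\n' (written by both Pythons)
def pvEntry (k v : String) : String := k ++ "=\"" ++ v ++ "\"\n"

-- ===== PORT A =====
-- A's inner loop 'for i, line in enumerate(...): if line.strip().startswith(f"{var_name}="):
-- env_contents[i] = entry; var_found = True; break' as structural recursion:
-- some = a match was found and replaced, none = var_found stayed False.
def pvReplaceFirst (pref entry : String) : List String → Option (List String)
  | [] => none
  | l :: ls =>
    if PySem.Str.startswith (PySem.Str.strip l) pref then some (entry :: ls)
    else (pvReplaceFirst pref entry ls).map (l :: ·)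

def pvStepA (env : List String) (kv : String × String) : List String :=
  match pvReplaceFirst (kv.1 ++ "=") (pvEntry kv.1 kv.2) env with
  | some env' => env'
  | none => env ++ [pvEntry kv.1 kv.2]

def format_env_contents (current_contents : List String) (updates : List (String × String)) : List String :=
  updates.foldl pvStepA current_contents

-- ===== PORT B =====
-- Source B's register(first, line, i)
def pvRegister (first : PySem.Dict String Int) (line : String) (i : Int) : PySem.Dict String Int :=
  let stripped := PySem.Str.strip line
  let p := PySem.Str.find stripped "="
  if p ≠ -1 ∧ first.contains (PySem.Str.slice stripped none (some p)) = false then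
    first.insert (PySem.Str.slice stripped none (some p)) i
  else first

-- Source B's initial 'for i, line in enumerate(env_contents): register(first, line, i)'
def pvInitB (current_contents : List String) : PySem.Dict String Int :=
  (PySem.List.enumerate current_contents 0).foldl (fun f il => pvRegister f il.2 il.1) PySem.Dict.empty

-- Source B's update-loop body; 'env_contents[i] = entry' is PySem.List.pySetD, exact here because
-- every index the dict stores is a valid index of the current list (proved below).
def pvStepB (st : List String × PySem.Dict String Int) (kv : String × String) :
    List String × PySem.Dict String Int :=
  let entry := pvEntry kv.1 kv.2
  match st.2.get? kv.1 with
  | none => (st.1 ++ [entry], pvRegister st.2 entry ((st.1.length : Int)))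
  | some i => (PySem.List.pySetD st.1 i entry, st.2)

def format_env_contents_alt (current_contents : List String) (updates : List (String × String)) : List String :=
  (updates.foldl pvStepB (current_contents, pvInitB current_contents)).1

-- ===== PRECONDITION & SPEC =====
-- 'line.strip().startswith(k + "=")' — A's match test (used by Pre_ below and by the proofs)
def pvMtch (k : String) : String → Bool :=
  fun line => PySem.Str.startswith (PySem.Str.strip line) (k ++ "=")

-- Pre_ excludes updates carrying a variable name that contains '=' (nonsensical in an env file)
-- AND prefix-matches an existing line or an earlier update's formatted entry: there A's raw
-- prefix match lets that name capture another variable's line, while B reads a line's variable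
-- name as the text before its first '='; on all other inputs A and B agree.
def Pre_format_env_contents (current_contents : List String) (updates : List (String × String)) : Prop :=
  (∀ kv ∈ updates, '=' ∈ kv.1.toList → ∀ l ∈ current_contents, pvMtch kv.1 l = false) ∧
  List.Pairwise (fun a b => '=' ∈ b.1.toList → pvMtch b.1 (pvEntry a.1 a.2) = false) updates
instance (current_contents : List String) (updates : List (String × String)) : Decidable (Pre_format_env_contents current_contents updates) := by unfold Pre_format_env_contents; infer_instance

def pvWitness_format_env_contents : List String × (List (String × String)) :=
  (["A=1\n", "# comment\n"], [("A", "2"), ("B", "3")])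

def Spec_format_env_contents (current_contents : List String) (updates : List (String × String)) (out : List String) : Prop := out = format_env_contents_alt current_contents updates
instance (current_contents : List String) (updates : List (String × String)) (out : List String) : Decidable (Spec_format_env_contents current_contents updates out) := by unfold Spec_format_env_contents; infer_instance

-- ===== CLAIM (what is proved, stated in full; the proofs are below) =====
def Claim_equal_format_env_contents : Prop := ∀ (current_contents : List String) (updates : List (String × String)), Dom_format_env_contents current_contents updates → Pre_format_env_contents current_contents updates → Spec_format_env_contents current_contents updates (format_env_contents current_contents updates)

-- ===== LEMMAS AND PROOFS =====

-- the variable name Source B's register reads off a line (none = no '=' in the stripped line)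
def pvCName (s : List Char) : Option (List Char) :=
  if PySem.Chars.find (PySem.Chars.strip s) ['='] = -1 then none
  else some ((PySem.Chars.strip s).take (PySem.Chars.find (PySem.Chars.strip s) ['=']).toNat)

def pvNameOf (line : String) : Option String := (pvCName line.toList).map String.ofList

-- ---- char-level facts ----

theorem pv_head?_dropWhile {p : Char → Bool} :
    ∀ (l : List Char) (c : Char), (l.dropWhile p).head? = some c → p c = false
  | [], c, h => by simp at h
  | a :: l, c, h => by
    by_cases hp : p a
    · exact pv_head?_dropWhile l c (by simpa [List.dropWhile_cons, hp] using h)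
    · have hac : a = c := by simpa [List.dropWhile_cons, hp] using h
      rw [← hac]; simpa using hp

theorem pv_strip_head (cs : List Char) (c : Char)
    (h : (PySem.Chars.strip cs).head? = some c) : PySem.Chars.isspace c = false := by
  have hs : PySem.Chars.strip cs <+: PySem.Chars.lstrip cs := by
    have h1 : (List.dropWhile PySem.Chars.isspace (PySem.Chars.lstrip cs).reverse)
        <:+ (PySem.Chars.lstrip cs).reverse := List.dropWhile_suffix _
    have h2 := List.reverse_prefix.mpr h1
    simpa [PySem.Chars.strip, PySem.Chars.rstrip] using h2
  obtain ⟨t, ht⟩ := hs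
  have hh : (PySem.Chars.lstrip cs).head? = some c := by
    rw [← ht]
    cases hsc : PySem.Chars.strip cs with
    | nil => rw [hsc] at h; simp at h
    | cons a l =>
      rw [hsc] at h
      simp at h
      simp [h]
  exact pv_head?_dropWhile cs c (by simpa [PySem.Chars.lstrip] using hh)

theorem pv_singleton_prefix_iff (a : Char) (l : List Char) :
    [a] <+: l ↔ l.head? = some a := by
  cases l with
  | nil => simp
  | cons b t =>
    constructor
    · rintro ⟨u, hu⟩
      simp at hu
      simp [hu.1]
    · intro h
      simp at h
      exact ⟨t, by simp [h]⟩

theorem pv_head?_take {α : Type} (l : List α) (n : Nat) (a : α)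
    (h : (l.take n).head? = some a) : l.head? = some a := by
  cases n with
  | zero => simp at h
  | succ m =>
    cases l with
    | nil => simp at h
    | cons b t => simpa using h

theorem pv_takeWhile_ne_mem (l : List Char) : '=' ∉ l.takeWhile (· != '=') := by
  intro h
  have := List.mem_takeWhile_imp h
  simp at this

theorem pv_takeWhile_all (l : List Char) (h : '=' ∉ l) : l.takeWhile (· != '=') = l := by
  induction l with
  | nil => simp
  | cons a t ih =>
    have ha : a ≠ '=' := by intro e; exact h (by simp [e])
    have ht : '=' ∉ t := fun m => h (by simp [m])
    simp [List.takeWhile_cons, ha, ih ht]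

theorem pv_find_eq (k t : List Char) (hk : '=' ∉ k) :
    PySem.Chars.find (k ++ '=' :: t) ['='] = (k.length : Int) := by
  have hinf : ['='] <:+: k ++ '=' :: t := ⟨k, t, by simp⟩
  have h0 : 0 ≤ PySem.Chars.find (k ++ '=' :: t) ['='] := (PySem.Chars.find_nonneg_iff _ _).mpr hinf
  obtain ⟨hpre, hmin⟩ := PySem.Chars.find_spec h0
  set n := (PySem.Chars.find (k ++ '=' :: t) ['=']).toNat with hn
  have hk1 : ['='] <+: (k ++ '=' :: t).drop k.length := by
    rw [List.drop_left]; exact ⟨t, rfl⟩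
  have hnlt : ¬ n < k.length := by
    intro hlt
    have h1 : ((k ++ '=' :: t).drop n).head? = some '=' := (pv_singleton_prefix_iff _ _).mp hpre
    rw [List.head?_drop, List.getElem?_append_left hlt] at h1
    exact hk (List.mem_of_getElem? h1)
  have hlen : ¬ k.length < n := fun hlt => hmin k.length hlt hk1
  have h2 := Int.toNat_of_nonneg h0
  omega

theorem pv_find_eq' (u w : List Char) :
    PySem.Chars.find (u ++ '=' :: w) ['='] = ((u.takeWhile (· != '=')).length : Int) := by
  by_cases hm : '=' ∈ u
  · have htadw := List.takeWhile_append_dropWhile (p := (· != '=')) (l := u)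
    have hdne : u.dropWhile (· != '=') ≠ [] := by
      intro h0
      rw [h0, List.append_nil] at htadw
      rw [← htadw] at hm
      exact pv_takeWhile_ne_mem u hm
    obtain ⟨c, dW', hdw⟩ := List.exists_cons_of_ne_nil hdne
    have hc : c = '=' := by
      have h := pv_head?_dropWhile (p := (· != '=')) u c (by rw [hdw]; rfl)
      simpa using h
    have hu : u = u.takeWhile (· != '=') ++ '=' :: dW' := by
      conv_lhs => rw [← htadw]
      rw [hdw, hc]
    have hsplit : u ++ '=' :: w = u.takeWhile (· != '=') ++ '=' :: (dW' ++ '=' :: w) := by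
      conv_lhs => rw [hu]
      simp
    rw [hsplit, pv_find_eq _ _ (pv_takeWhile_ne_mem u)]
  · rw [pv_find_eq u w hm, pv_takeWhile_all u hm]

theorem pv_match_iff_cname (k cs : List Char) (hk : '=' ∉ k) :
    PySem.Chars.startswith (PySem.Chars.strip cs) (k ++ ['=']) = true ↔ pvCName cs = some k := by
  rw [PySem.Chars.startswith_iff]
  unfold pvCName
  constructor
  · rintro ⟨t, ht⟩
    have ht' : PySem.Chars.strip cs = k ++ '=' :: t := by rw [← ht]; simp
    rw [ht', pv_find_eq k t hk]
    have hne : ((k.length : Int)) ≠ -1 := by omega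
    simp [hne]
  · intro h
    by_cases hne : PySem.Chars.find (PySem.Chars.strip cs) ['='] = -1
    · simp [hne] at h
    · simp only [hne, if_false, Option.some_inj] at h
      have h0 : 0 ≤ PySem.Chars.find (PySem.Chars.strip cs) ['='] := by
        have := PySem.Chars.neg_one_le_find (PySem.Chars.strip cs) ['=']
        omega
      obtain ⟨hpre, hmin⟩ := PySem.Chars.find_spec h0
      set n := (PySem.Chars.find (PySem.Chars.strip cs) ['=']).toNat with hn
      have h1 : ((PySem.Chars.strip cs).drop n).head? = some '=' :=
        (pv_singleton_prefix_iff _ _).mp hpre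
      rw [List.head?_drop] at h1
      obtain ⟨hlt, hTn⟩ := List.getElem?_eq_some_iff.mp h1
      refine ⟨(PySem.Chars.strip cs).drop (n + 1), ?_⟩
      calc (k ++ ['=']) ++ (PySem.Chars.strip cs).drop (n + 1)
          = k ++ '=' :: (PySem.Chars.strip cs).drop (n + 1) := by simp
        _ = (PySem.Chars.strip cs).take n ++
              (PySem.Chars.strip cs)[n] :: (PySem.Chars.strip cs).drop (n + 1) := by
            rw [h, hTn]
        _ = PySem.Chars.strip cs := by
            rw [← List.drop_eq_getElem_cons hlt, List.take_append_drop]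

theorem pv_cname_free (cs nk : List Char) (h : pvCName cs = some nk) : '=' ∉ nk := by
  unfold pvCName at h
  by_cases hne : PySem.Chars.find (PySem.Chars.strip cs) ['='] = -1
  · simp [hne] at h
  · simp only [hne, if_false, Option.some_inj] at h
    have h0 : 0 ≤ PySem.Chars.find (PySem.Chars.strip cs) ['='] := by
      have := PySem.Chars.neg_one_le_find (PySem.Chars.strip cs) ['=']
      omega
    obtain ⟨hpre, hmin⟩ := PySem.Chars.find_spec h0
    set n := (PySem.Chars.find (PySem.Chars.strip cs) ['=']).toNat with hn
    intro hmem
    rw [← h] at hmem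
    obtain ⟨j, hj, hje⟩ := List.getElem_of_mem hmem
    have hjn : j < n := by
      simp [List.length_take] at hj
      omega
    have hjT : j < (PySem.Chars.strip cs).length := by
      simp [List.length_take] at hj
      omega
    refine hmin j hjn ?_
    rw [pv_singleton_prefix_iff, List.head?_drop, List.getElem?_eq_getElem hjT]
    rw [List.getElem_take] at hje
    rw [hje]

theorem pv_cname_no_leading (cs nk : List Char) (h : pvCName cs = some nk) :
    nk.dropWhile PySem.Chars.isspace = nk := by
  cases hnkc : nk with
  | nil => simp
  | cons a l =>
    unfold pvCName at h
    by_cases hne : PySem.Chars.find (PySem.Chars.strip cs) ['='] = -1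
    · simp [hne] at h
    · simp only [hne, if_false, Option.some_inj] at h
      have hTh : (PySem.Chars.strip cs).head? = some a := by
        apply pv_head?_take _ (PySem.Chars.find (PySem.Chars.strip cs) ['=']).toNat
        rw [h, hnkc]
        simp
      have hns := pv_strip_head cs a hTh
      simp [hns]

theorem pv_strip_entry (k v : List Char) :
    PySem.Chars.strip (k ++ '=' :: '"' :: (v ++ ['"', '\n'])) =
      k.dropWhile PySem.Chars.isspace ++ '=' :: '"' :: (v ++ ['"']) := by
  have hsp1 : PySem.Chars.isspace '=' = false := by decide
  have hsp2 : PySem.Chars.isspace '"' = false := by decide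
  have hsp3 : PySem.Chars.isspace '\n' = true := by decide
  unfold PySem.Chars.strip PySem.Chars.lstrip PySem.Chars.rstrip
  have h1 : List.dropWhile PySem.Chars.isspace (k ++ '=' :: '"' :: (v ++ ['"', '\n'])) =
      k.dropWhile PySem.Chars.isspace ++ '=' :: '"' :: (v ++ ['"', '\n']) := by
    rw [List.dropWhile_append]
    by_cases hke : (List.dropWhile PySem.Chars.isspace k).isEmpty
    · rw [if_pos hke]
      rw [List.dropWhile_cons]
      simp only [hsp1]
      simp only [List.isEmpty_iff] at hke
      rw [hke]
      simp
    · rw [if_neg hke]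
  rw [h1]
  have h2 : (k.dropWhile PySem.Chars.isspace ++ '=' :: '"' :: (v ++ ['"', '\n'])).reverse
      = '\n' :: '"' :: (v.reverse ++ '"' :: '=' :: (k.dropWhile PySem.Chars.isspace).reverse) := by
    simp
  rw [h2]
  rw [List.dropWhile_cons]
  simp only [hsp3, if_true]
  rw [List.dropWhile_cons]
  simp only [hsp2]
  simp

theorem pv_take_takeWhile (p : Char → Bool) (l rest : List Char) :
    List.take (l.takeWhile p).length (l ++ rest) = l.takeWhile p := by
  have h : l ++ rest = l.takeWhile p ++ (l.dropWhile p ++ rest) := by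
    rw [← List.append_assoc, List.takeWhile_append_dropWhile]
  rw [h, List.take_left]

theorem pv_cname_entry (k v : List Char) :
    pvCName (k ++ '=' :: '"' :: (v ++ ['"', '\n'])) =
      some ((k.dropWhile PySem.Chars.isspace).takeWhile (· != '=')) := by
  unfold pvCName
  rw [pv_strip_entry, pv_find_eq']
  have hne : ((((k.dropWhile PySem.Chars.isspace).takeWhile (· != '=')).length : Int)) ≠ -1 := by
    omega
  simp [hne, pv_take_takeWhile]

-- ---- string-level bridges ----

theorem pv_entry_toList (k v : String) :
    (pvEntry k v).toList = k.toList ++ '=' :: '"' :: (v.toList ++ ['"', '\n']) := by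
  have h1 : ("=\"" : String).toList = ['=', '"'] := by decide
  have h2 : ("\"\n" : String).toList = ['"', '\n'] := by decide
  simp [pvEntry, h1, h2]

theorem pv_mtch_eq (k line : String) :
    pvMtch k line = PySem.Chars.startswith (PySem.Chars.strip line.toList) (k.toList ++ ['=']) := by
  have h1 : ("=" : String).toList = ['='] := by decide
  simp [pvMtch, PySem.Str.startswith_eq, PySem.Str.toList_strip, h1]

theorem pv_mtch_iff (k line : String) (hk : '=' ∉ k.toList) :
    pvMtch k line = true ↔ pvNameOf line = some k := by
  rw [pv_mtch_eq, pv_match_iff_cname k.toList line.toList hk]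
  unfold pvNameOf
  constructor
  · intro h; rw [h]; simp
  · intro h
    cases hc : pvCName line.toList with
    | none => rw [hc] at h; simp at h
    | some cs =>
      rw [hc] at h
      simp at h
      have hcs : cs = k.toList := by rw [← h]; simp
      rw [hcs]

theorem pv_nameOf_mtch_decide (k line : String) (hk : '=' ∉ k.toList) :
    pvMtch k line = decide (pvNameOf line = some k) := by
  by_cases h : pvNameOf line = some k
  · simp [h, (pv_mtch_iff k line hk).mpr h]
  · simp only [h, decide_false]
    by_cases hm : pvMtch k line
    · exact absurd ((pv_mtch_iff k line hk).mp hm) h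
    · simpa using hm

theorem pv_nameOf_some_free (line nk : String) (h : pvNameOf line = some nk) :
    '=' ∉ nk.toList := by
  unfold pvNameOf at h
  cases hc : pvCName line.toList with
  | none => rw [hc] at h; simp at h
  | some cs =>
    rw [hc] at h
    simp at h
    have h2 := pv_cname_free line.toList cs hc
    rw [← h]
    simpa using h2

theorem pv_nameOf_no_leading (line nk : String) (h : pvNameOf line = some nk) :
    nk.toList.dropWhile PySem.Chars.isspace = nk.toList := by
  unfold pvNameOf at h
  cases hc : pvCName line.toList with
  | none => rw [hc] at h; simp at h
  | some cs =>
    rw [hc] at h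
    simp at h
    have h2 := pv_cname_no_leading line.toList cs hc
    rw [← h]
    simpa using h2

theorem pv_nameOf_entry (k v : String) :
    pvNameOf (pvEntry k v) =
      some (String.ofList ((k.toList.dropWhile PySem.Chars.isspace).takeWhile (· != '='))) := by
  unfold pvNameOf
  rw [pv_entry_toList, pv_cname_entry k.toList v.toList]
  simp

-- ---- characterizations of the two loop bodies ----

theorem pv_register_eq (f : PySem.Dict String Int) (line : String) (i : Int) :
    pvRegister f line i = match pvNameOf line with
      | none => f
      | some nk => if f.contains nk = false then f.insert nk i else f := by
  unfold pvRegister pvNameOf pvCName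
  have h1 : ("=" : String).toList = ['='] := by decide
  have hfe : PySem.Str.find (PySem.Str.strip line) "=" =
      PySem.Chars.find (PySem.Chars.strip line.toList) ['='] := by
    rw [PySem.Str.find_eq, PySem.Str.toList_strip, h1]
  by_cases hne : PySem.Chars.find (PySem.Chars.strip line.toList) ['='] = -1
  · simp [hne]
  · have h0 : 0 ≤ PySem.Chars.find (PySem.Chars.strip line.toList) ['='] := by
      have := PySem.Chars.neg_one_le_find (PySem.Chars.strip line.toList) ['=']
      omega
    have hsl : PySem.Str.slice (PySem.Str.strip line) none
          (some (PySem.Chars.find (PySem.Chars.strip line.toList) ['='])) =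
        String.ofList ((PySem.Chars.strip line.toList).take
          (PySem.Chars.find (PySem.Chars.strip line.toList) ['=']).toNat) := by
      apply String.ext
      rw [PySem.Str.toList_slice, PySem.Str.toList_strip, PySem.Chars.slice_eq_listSlice,
        PySem.List.slice_to _ h0]
      simp
    simp [hne, hsl]

theorem pv_replaceFirst_eq (k e : String) (l : List String) :
    pvReplaceFirst (k ++ "=") e l = (l.findIdx? (pvMtch k)).map (fun n => l.set n e) := by
  induction l with
  | nil => simp [pvReplaceFirst]
  | cons a l ih =>
    show (if pvMtch k a = true then some (e :: l)
          else (pvReplaceFirst (k ++ "=") e l).map (a :: ·)) =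
        ((a :: l).findIdx? (pvMtch k)).map (fun n => (a :: l).set n e)
    rw [List.findIdx?_cons]
    by_cases h : pvMtch k a = true
    · rw [if_pos h, if_pos h]
      simp
    · rw [if_neg h, if_neg h, ih]
      cases List.findIdx? (pvMtch k) l <;> simp [List.set_cons_succ]

-- ---- findIdx? helpers ----

theorem pv_findIdx?_congr {α : Type} (p q : α → Bool) (l : List α)
    (h : ∀ a ∈ l, p a = q a) : l.findIdx? p = l.findIdx? q := by
  induction l with
  | nil => rfl
  | cons a l ih =>
    rw [List.findIdx?_cons, List.findIdx?_cons, h a (by simp),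
      ih (fun b hb => h b (by simp [hb]))]

theorem pv_findIdx?_set {α : Type} (p : α → Bool) (l : List α) (n : Nat) (e : α)
    (hn : n < l.length) (he : p e = p (l[n]'hn)) : (l.set n e).findIdx? p = l.findIdx? p := by
  induction l generalizing n with
  | nil => simp at hn
  | cons a l ih =>
    cases n with
    | zero =>
      simp only [List.getElem_cons_zero] at he
      simp [List.set_cons_zero, List.findIdx?_cons, he]
    | succ m =>
      simp only [List.length_cons, Nat.add_lt_add_iff_right] at hn
      simp only [List.getElem_cons_succ] at he
      simp [List.set_cons_succ, List.findIdx?_cons, ih m hn he]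

theorem pv_findIdx?_concat {α : Type} (p : α → Bool) (l : List α) (e : α) :
    (l ++ [e]).findIdx? p = (l.findIdx? p).or (if p e then some l.length else none) := by
  rw [List.findIdx?_append]
  by_cases h : p e <;> simp [h, List.findIdx?_cons]

-- ---- the dict invariant after the initial scan ----

theorem pv_init_fold (ls : List String) :
    ∀ (d : PySem.Dict String Int) (s : Int) (k : String),
      ((PySem.List.enumerate ls s).foldl (fun f il => pvRegister f il.2 il.1) d).get? k
        = (d.get? k).or
            ((ls.findIdx? (fun l => decide (pvNameOf l = some k))).map (fun n : Nat => s + (n : Int))) := by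
  induction ls with
  | nil =>
    intro d s k
    simp [PySem.List.enumerate_nil]
  | cons a ls ih =>
    intro d s k
    rw [PySem.List.enumerate_cons, List.foldl_cons, ih, pv_register_eq, List.findIdx?_cons]
    have hshift : ∀ (o : Option Nat),
        o.map (fun n : Nat => (s + 1) + (n : Int)) =
          (o.map (fun i => i + 1)).map (fun n : Nat => s + (n : Int)) := by
      intro o
      cases o with
      | none => rfl
      | some m => simp; ring
    cases hn : pvNameOf a with
    | none => simp [hshift]
    | some nk =>
      by_cases hnk : nk = k
      · subst hnk
        by_cases hc : d.contains nk
        · have hg : ∃ v, d.get? nk = some v := by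
            cases hgg : d.get? nk with
            | none =>
              rw [PySem.Dict.get?_eq_none_iff_contains] at hgg
              rw [hgg] at hc
              simp at hc
            | some v => exact ⟨v, rfl⟩
          obtain ⟨v, hv⟩ := hg
          have hcf : (d.contains nk = false) = False := by simp [hc]
          simp [hcf, hv]
        · have hcf : d.contains nk = false := by simpa using hc
          have hnone : d.get? nk = none := (PySem.Dict.get?_eq_none_iff_contains d nk).mpr hcf
          simp [hcf, PySem.Dict.get?_insert_self, hnone]
      · have hget : (if d.contains nk = false then d.insert nk s else d).get? k = d.get? k := by
          by_cases hc : d.contains nk = false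
          · rw [if_pos hc]
            exact PySem.Dict.get?_insert_of_ne d s (fun h => hnk h.symm)
          · rw [if_neg hc]
        simp [hnk, hget, hshift]

theorem pv_INV_init (cc : List String) (k : String) (hk : '=' ∉ k.toList) :
    (pvInitB cc).get? k = (cc.findIdx? (pvMtch k)).map (fun n : Nat => (n : Int)) := by
  unfold pvInitB
  rw [pv_init_fold cc PySem.Dict.empty 0 k, PySem.Dict.get?_empty]
  rw [pv_findIdx?_congr (fun l => decide (pvNameOf l = some k)) (pvMtch k) cc
    (fun a _ => (pv_nameOf_mtch_decide k a hk).symm)]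
  simp

theorem pv_INV3_init (cc : List String) (k : String) (hk : '=' ∈ k.toList) :
    (pvInitB cc).get? k = none := by
  unfold pvInitB
  rw [pv_init_fold cc PySem.Dict.empty 0 k, PySem.Dict.get?_empty]
  have hfx : cc.findIdx? (fun l => decide (pvNameOf l = some k)) = none := by
    rw [List.findIdx?_eq_none_iff]
    intro l _
    simp only [decide_eq_false_iff_not]
    intro h
    exact (pv_nameOf_some_free l k h) hk
  simp [hfx]

-- ---- the main induction over the updates ----

theorem pv_main_fold :
    ∀ (updates : List (String × String)) (lines : List String) (f : PySem.Dict String Int),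
      (∀ kv ∈ updates, '=' ∈ kv.1.toList → ∀ l ∈ lines, pvMtch kv.1 l = false) →
      List.Pairwise (fun a b => '=' ∈ b.1.toList → pvMtch b.1 (pvEntry a.1 a.2) = false) updates →
      (∀ k : String, '=' ∉ k.toList →
        f.get? k = (lines.findIdx? (pvMtch k)).map (fun n : Nat => (n : Int))) →
      (∀ k : String, '=' ∈ k.toList → f.get? k = none) →
      updates.foldl pvStepA lines = (updates.foldl pvStepB (lines, f)).1 := by
  intro updates
  induction updates with
  | nil => intro lines f _ _ _ _; rfl
  | cons kv updates ih =>
    intro lines f H1 H2 hinv1 hinv3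
    obtain ⟨Hhead, Htail⟩ := List.pairwise_cons.mp H2
    rw [List.foldl_cons, List.foldl_cons]
    have hstepA : pvStepA lines kv =
        match (lines.findIdx? (pvMtch kv.1)).map (fun n => lines.set n (pvEntry kv.1 kv.2)) with
        | some env' => env'
        | none => lines ++ [pvEntry kv.1 kv.2] := by
      unfold pvStepA
      rw [pv_replaceFirst_eq]
    cases hg : f.get? kv.1 with
    | some i =>
      have hk : '=' ∉ kv.1.toList := by
        intro hmem
        rw [hinv3 kv.1 hmem] at hg
        simp at hg
      have hfi : (lines.findIdx? (pvMtch kv.1)).map (fun n : Nat => (n : Int)) = some i :=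
        (hinv1 kv.1 hk).symm.trans hg
      cases hfx : lines.findIdx? (pvMtch kv.1) with
      | none => rw [hfx] at hfi; simp at hfi
      | some n =>
        rw [hfx] at hfi
        simp at hfi
        obtain ⟨hn, hpn, -⟩ := List.findIdx?_eq_some_iff_getElem.mp hfx
        have hmtch : pvNameOf (lines[n]'hn) = some kv.1 := (pv_mtch_iff kv.1 _ hk).mp hpn
        have hnolead : kv.1.toList.dropWhile PySem.Chars.isspace = kv.1.toList :=
          pv_nameOf_no_leading _ kv.1 hmtch
        have hentry : pvNameOf (pvEntry kv.1 kv.2) = some kv.1 := by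
          rw [pv_nameOf_entry kv.1 kv.2, hnolead, pv_takeWhile_all _ hk]
          simp
        have hA : pvStepA lines kv = lines.set n (pvEntry kv.1 kv.2) := by
          rw [hstepA, hfx]
          rfl
        have hB : pvStepB (lines, f) kv = (lines.set n (pvEntry kv.1 kv.2), f) := by
          unfold pvStepB
          simp only [hg]
          rw [← hfi, PySem.List.pySetD_natCast]
        rw [hA, hB]
        apply ih _ f ?_ Htail ?_ hinv3
        · intro kv'' hmem'' hkey'' l hl
          rcases List.mem_or_eq_of_mem_set hl with hl' | rfl
          · exact H1 kv'' (by simp [hmem'']) hkey'' l hl'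
          · exact Hhead kv'' hmem'' hkey''
        · intro k' hk'
          rw [hinv1 k' hk']
          congr 1
          exact (pv_findIdx?_set (pvMtch k') lines n (pvEntry kv.1 kv.2) hn
            (by rw [pv_nameOf_mtch_decide k' _ hk', pv_nameOf_mtch_decide k' _ hk',
              hentry, hmtch])).symm
    | none =>
      have hfx : lines.findIdx? (pvMtch kv.1) = none := by
        by_cases hk : '=' ∈ kv.1.toList
        · rw [List.findIdx?_eq_none_iff]
          intro l hl
          exact H1 kv (by simp) hk l hl
        · have hfi := (hinv1 kv.1 hk).symm.trans hg
          cases h : lines.findIdx? (pvMtch kv.1) with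
          | none => rfl
          | some n => rw [h] at hfi; simp at hfi
      have hA : pvStepA lines kv = lines ++ [pvEntry kv.1 kv.2] := by
        rw [hstepA, hfx]
        rfl
      have hB : pvStepB (lines, f) kv =
          (lines ++ [pvEntry kv.1 kv.2],
            pvRegister f (pvEntry kv.1 kv.2) ((lines.length : Int))) := by
        unfold pvStepB
        simp only [hg]
      rw [hA, hB]
      have hentry := pv_nameOf_entry kv.1 kv.2
      set nk := String.ofList ((kv.1.toList.dropWhile PySem.Chars.isspace).takeWhile (· != '='))
        with hnkdef
      have hnkfree : '=' ∉ nk.toList := by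
        rw [hnkdef]
        intro h
        simp at h
        exact pv_takeWhile_ne_mem _ h
      apply ih _ _ ?_ Htail ?_ ?_
      · intro kv'' hmem'' hkey'' l hl
        rcases List.mem_append.mp hl with hl' | hl'
        · exact H1 kv'' (by simp [hmem'']) hkey'' l hl'
        · simp at hl'
          rw [hl']
          exact Hhead kv'' hmem'' hkey''
      · intro k' hk'
        rw [pv_register_eq, hentry, pv_findIdx?_concat]
        by_cases hkeq : k' = nk
        · rw [hkeq] at hk' ⊢
          have hpe : pvMtch nk (pvEntry kv.1 kv.2) = true := (pv_mtch_iff _ _ hk').mpr hentry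
          rw [hpe]
          by_cases hc : f.contains nk
          · have hcf : (f.contains nk = false) = False := by simp [hc]
            have hg' : ∃ v, f.get? nk = some v := by
              cases hgg : f.get? nk with
              | none =>
                rw [PySem.Dict.get?_eq_none_iff_contains] at hgg
                rw [hgg] at hc
                simp at hc
              | some v => exact ⟨v, rfl⟩
            obtain ⟨v, hv⟩ := hg'
            have hold := (hinv1 nk hk').symm.trans hv
            cases hfx' : lines.findIdx? (pvMtch nk) with
            | none => rw [hfx'] at hold; simp at hold
            | some m =>
              rw [hfx'] at hold
              simp at hold
              simp [hcf, hv, hold]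
          · have hcf : f.contains nk = false := by simpa using hc
            have hnone : f.get? nk = none := (PySem.Dict.get?_eq_none_iff_contains f nk).mpr hcf
            have hold := (hinv1 nk hk').symm.trans hnone
            have hfx' : lines.findIdx? (pvMtch nk) = none := by
              cases h : lines.findIdx? (pvMtch nk) with
              | none => rfl
              | some m => rw [h] at hold; simp at hold
            simp [hcf, PySem.Dict.get?_insert_self, hfx']
        · have hpe : pvMtch k' (pvEntry kv.1 kv.2) = false := by
            by_cases h : pvMtch k' (pvEntry kv.1 kv.2)
            · exfalso
              have := (pv_mtch_iff _ _ hk').mp h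
              rw [hentry] at this
              simp at this
              exact hkeq this.symm
            · simpa using h
          rw [hpe]
          have hget : (if f.contains nk = false then f.insert nk ((lines.length : Int)) else f).get? k'
              = f.get? k' := by
            by_cases hc : f.contains nk = false
            · rw [if_pos hc]
              exact PySem.Dict.get?_insert_of_ne f _ hkeq
            · rw [if_neg hc]
          rw [hget, hinv1 k' hk']
          cases lines.findIdx? (pvMtch k') <;> simp
      · intro k3 h3
        rw [pv_register_eq, hentry]
        have hne3 : k3 ≠ nk := by
          intro e
          rw [e] at h3
          exact hnkfree h3
        by_cases hc : f.contains nk = false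
        · show (if f.contains nk = false then f.insert nk ((lines.length : Int)) else f).get? k3 = none
          rw [if_pos hc, PySem.Dict.get?_insert_of_ne f _ hne3]
          exact hinv3 k3 h3
        · show (if f.contains nk = false then f.insert nk ((lines.length : Int)) else f).get? k3 = none
          rw [if_neg hc]
          exact hinv3 k3 h3

-- ===== VERDICT (by name: the statement is the Claim_ definition above) =====
theorem format_env_contents_spec : Claim_equal_format_env_contents := by
  intro cc updates _ hpre
  unfold Spec_format_env_contents format_env_contents format_env_contents_alt
  exact pv_main_fold updates cc (pvInitB cc) hpre.1 hpre.2
    (fun k hk => pv_INV_init cc k hk) (fun k hk => pv_INV3_init cc k hk)
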